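-- pv_equiv track=rewrite | github.com/AMIVAYUN/codeTestPrac | Programmers/Python/비밀지도.py | solution11
-- ===== SOURCE A (Python) =====
-- def solution11( n , arr1, arr2 ):
--     #assignment
--     doc = " #"
--     answer = [ "0" ] * len( arr1 );
--     lst = [ arr1[i] | arr2[i] for i in range( len( arr1 ) ) ]
--     #logic
--     for i in range( len( lst ) ):
--         str0 = ""
--         idx = n - 1;
--         for idx in range( n - 1 , -1 , -1 ):
--             str0 += doc[ ( lst[ i ] >> idx ) & 1 ];
--         answer[ i ] = answer[ i ].replace( "0", str0 );
--     #return
--     return answer;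
-- ===== SOURCE B (Python) =====
-- def solution11(n, arr1, arr2):
--     # Rows where either grid has a wall ('#'); n==0 (or negative) rows are empty.
--     if n <= 0:
--         return ['' for _ in arr1]
--     mask = (1 << n) - 1
--     table = str.maketrans('01', ' #')
--     return [format((a | b) & mask, '0{}b'.format(n)).translate(table)
--             for a, b in zip(arr1, arr2)]
-- ===== Notes on version B (the rewrite author's own statement) =====
-- stated objective: idiomatic
-- what changed: Replaces the per-bit shift loop over each row with a single stdlib binary formatting (format(v & mask, '0nb')) followed by a character translation '1'->'#','0'->' ', and replaces index-driven list mutation with a comprehension over zip(arr1, arr2).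
import Mathlib
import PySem

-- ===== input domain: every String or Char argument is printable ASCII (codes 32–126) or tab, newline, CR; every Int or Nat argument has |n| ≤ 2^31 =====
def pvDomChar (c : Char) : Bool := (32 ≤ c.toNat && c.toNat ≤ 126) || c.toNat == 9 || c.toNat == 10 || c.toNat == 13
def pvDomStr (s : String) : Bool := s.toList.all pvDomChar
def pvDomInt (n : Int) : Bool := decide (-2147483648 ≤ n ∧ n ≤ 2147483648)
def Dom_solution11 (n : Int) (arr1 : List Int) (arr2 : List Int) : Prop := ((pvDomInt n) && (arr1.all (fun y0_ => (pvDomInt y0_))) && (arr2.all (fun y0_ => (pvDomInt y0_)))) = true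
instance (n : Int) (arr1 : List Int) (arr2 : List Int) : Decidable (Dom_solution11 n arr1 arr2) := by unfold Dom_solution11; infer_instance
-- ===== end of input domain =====

-- B replaces A's per-bit shift loop by stdlib binary formatting plus character translation,
-- and A's index-driven list mutation by a map over the zipped rows (objective: idiomatic).

-- ===== PORT A =====
def solution11 (n : Int) (arr1 : List Int) (arr2 : List Int) : List String :=
  let doc : String := " #"
  let answer : List String := List.replicate arr1.length "0"
  let lst : List Int := (PySem.List.pyRange 0 arr1.length 1).map
      (fun i => PySem.Int.bor (PySem.List.pyGetD arr1 i 0) (PySem.List.pyGetD arr2 i 0))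
  (PySem.List.pyRange 0 lst.length 1).foldl (fun ans i =>
      let str0 : String := (PySem.List.pyRange (n - 1) (-1) (-1)).foldl
        (fun (s : String) (idx : Int) =>
          s.push ((PySem.Str.pyGet? doc
            (PySem.Int.band ((PySem.List.pyGetD lst i 0) >>> idx.toNat) 1)).getD ' '))
        ""
      PySem.List.pySetD ans i (PySem.Str.replace (PySem.List.pyGetD ans i "") "0" str0))
    answer

-- ===== PORT B =====
-- format(v, '0{w}b') for v ≥ 0: binary digits (PySem.Int.toBinChars = format(v,'b')) left-padded with '0' to width w
def fmtPad (w : Nat) (v : Int) : List Char :=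
  let ds := PySem.Int.toBinChars v
  List.replicate (w - ds.length) '0' ++ ds

-- str.maketrans('01', ' #') applied per character
def trChar (c : Char) : Char := if c = '0' then ' ' else if c = '1' then '#' else c

def solution11_alt (n : Int) (arr1 : List Int) (arr2 : List Int) : List String :=
  if n ≤ 0 then arr1.map (fun _ => "")
  else
    let mask : Int := ((1 : Int) <<< n.toNat) - 1
    (arr1.zip arr2).map (fun p =>
      String.ofList ((fmtPad n.toNat (PySem.Int.band (PySem.Int.bor p.1 p.2) mask)).map trChar))

-- ===== PRECONDITION & SPEC =====
-- Pre_ excludes len(arr1) > len(arr2), on which A's arr2[i] raises IndexError.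
def Pre_solution11 (n : Int) (arr1 : List Int) (arr2 : List Int) : Prop :=
  arr1.length ≤ arr2.length
instance (n : Int) (arr1 : List Int) (arr2 : List Int) : Decidable (Pre_solution11 n arr1 arr2) := by unfold Pre_solution11; infer_instance

def pvWitness_solution11 : Int × List Int × List Int := (5, [9, 20, 28, 18, 11], [30, 1, 21, 17, 28])


def Spec_solution11 (n : Int) (arr1 : List Int) (arr2 : List Int) (out : List String) : Prop := out = solution11_alt n arr1 arr2
instance (n : Int) (arr1 : List Int) (arr2 : List Int) (out : List String) : Decidable (Spec_solution11 n arr1 arr2 out) := by unfold Spec_solution11; infer_instance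

-- ===== CLAIM (what is proved, stated in full; the proofs are below) =====
def Claim_equal_solution11 : Prop := ∀ (n : Int) (arr1 : List Int) (arr2 : List Int), Dom_solution11 n arr1 arr2 → Pre_solution11 n arr1 arr2 → Spec_solution11 n arr1 arr2 (solution11 n arr1 arr2)


-- ===== LEMMAS AND PROOFS =====

-- lowest-bit-last spec of one row's characters (' '/'#'), over the Int value
def mapBits : Nat → Int → List Char
  | 0, _ => []
  | k + 1, v => mapBits k (v >>> (1 : Nat)) ++ [if v % 2 = 1 then '#' else ' ']

-- lowest-digit-last spec of the zero-padded binary digits ('0'/'1'), over the Nat value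
def bitsN : Nat → Nat → List Char
  | 0, _ => []
  | k + 1, w => bitsN k (w / 2) ++ [if w % 2 = 1 then '1' else '0']

-- structural form of Nat.toDigits 2
def binDigits (w : Nat) : List Char :=
  if _h : w < 2 then [Nat.digitChar w]
  else binDigits (w / 2) ++ [Nat.digitChar (w % 2)]
decreasing_by exact Nat.div_lt_self (by omega) (by omega)

theorem toDigitsCore_two_eq (f : Nat) : ∀ (w : Nat) (acc : List Char), w < f →
    Nat.toDigitsCore 2 f w acc = binDigits w ++ acc := by
  induction f with
  | zero => intro w acc h; omega
  | succ f ih =>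
    intro w acc h
    rw [Nat.toDigitsCore]
    by_cases h2 : w / 2 = 0
    · simp only [h2, if_true]
      have hw : w < 2 := by omega
      rw [binDigits, dif_pos hw]
      simp [Nat.mod_eq_of_lt hw]
    · simp only [h2, if_false]
      have hw2 : ¬ w < 2 := by omega
      have hlt : w / 2 < f := by omega
      rw [ih (w / 2) _ hlt]
      conv_rhs => rw [binDigits, dif_neg hw2]
      simp

theorem toDigits_two_eq (w : Nat) : Nat.toDigits 2 w = binDigits w := by
  rw [Nat.toDigits, toDigitsCore_two_eq (w + 1) w [] (by omega)]
  simp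

theorem band_two_pow_sub_one (v : Int) (k : Nat) :
    PySem.Int.band v (2 ^ k - 1) = v % 2 ^ k := by
  have hP : (0:Int) < 2^k := by positivity
  have hcast : ((2^k : Nat) : Int) = 2^k := by push_cast; ring
  by_cases hv : 0 ≤ v
  · rw [PySem.Int.band, if_pos hv, if_pos (by omega)]
    have h1 : (2^k - 1 : Int).toNat = 2^k - 1 := by omega
    rw [h1, Nat.and_two_pow_sub_one_eq_mod]
    have h2 : ((v.toNat : Int)) = v := by omega
    calc ((v.toNat % 2^k : Nat) : Int) = (v.toNat : Int) % ((2^k : Nat) : Int) := by push_cast; ring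
    _ = v % 2^k := by rw [h2, hcast]
  · rw [PySem.Int.band, if_neg hv, if_pos (by omega)]
    set u : Nat := (-v - 1).toNat with hu
    have hvu : v = -(u : Int) - 1 := by omega
    have h1 : (2^k - 1 : Int).toNat = 2^k - 1 := by omega
    rw [h1, Nat.and_comm, Nat.and_two_pow_sub_one_eq_mod]
    have hr : u % 2^k < 2^k := Nat.mod_lt _ (by positivity)
    have key := Int.ediv_add_emod (u : Int) (2^k)
    have hrc : ((u % 2^k : Nat) : Int) = (u : Int) % 2^k := by push_cast; ring
    have hsplit : v = (2^k - 1 - (u:Int) % 2^k) + 2^k * (-((u:Int) / 2^k) - 1) := by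
      rw [hvu]; ring_nf; ring_nf at key; linarith
    rw [hsplit, Int.add_mul_emod_self_left]
    rw [Int.emod_eq_of_lt (by omega) (by omega)]
    omega

theorem binDigits_length_le (k : Nat) : ∀ w : Nat, 1 ≤ k → w < 2 ^ k →
    (binDigits w).length ≤ k := by
  induction k with
  | zero => omega
  | succ k ih =>
    intro w _ hw
    have hp : 2 ^ (k + 1) = 2 * 2 ^ k := by ring
    by_cases h2 : w < 2
    · rw [binDigits, dif_pos h2]; simp
    · have hk : 1 ≤ k := by
        by_contra hk0
        interval_cases k <;> omega
      rw [binDigits, dif_neg h2]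
      have := ih (w / 2) hk (by omega)
      simp only [List.length_append, List.length_singleton]
      omega

theorem bitsN_zero_eq (k : Nat) : bitsN k 0 = List.replicate k '0' := by
  induction k with
  | zero => rfl
  | succ k ih => rw [bitsN]; simp [ih, List.replicate_succ']

theorem digitChar_bin (w : Nat) (h : w < 2) :
    Nat.digitChar w = if w % 2 = 1 then '1' else '0' := by
  interval_cases w <;> rfl

theorem padBin (k : Nat) : ∀ w : Nat, 1 ≤ k → w < 2 ^ k →
    List.replicate (k - (binDigits w).length) '0' ++ binDigits w = bitsN k w := by
  induction k with
  | zero => omega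
  | succ k ih =>
    intro w _ hw
    have hp : 2 ^ (k + 1) = 2 * 2 ^ k := by ring
    by_cases hk : k = 0
    · subst hk
      have h2 : w < 2 := by omega
      rw [binDigits, dif_pos h2, bitsN]
      interval_cases w <;> rfl
    · by_cases h2 : w < 2
      · rw [binDigits, dif_pos h2, bitsN]
        have h0 : w / 2 = 0 := by omega
        rw [h0, bitsN_zero_eq, digitChar_bin w h2]
        simp only [List.length_singleton, Nat.add_sub_cancel]
      · rw [binDigits, dif_neg h2]
        have hlen : (binDigits (w / 2)).length ≤ k :=
          binDigits_length_le k (w / 2) (by omega) (by omega)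
        rw [bitsN, ← ih (w / 2) (by omega) (by omega),
            digitChar_bin (w % 2) (by omega)]
        have hm : w % 2 % 2 = w % 2 := by omega
        simp only [List.length_append, List.length_singleton]
        have hc : k + 1 - ((binDigits (w / 2)).length + 1)
            = k - (binDigits (w / 2)).length := by omega
        rw [hm, hc, ← List.append_assoc]

theorem halve (v : Int) (k : Nat) :
    (v % 2 ^ (k + 1)).toNat / 2 = ((v / 2) % 2 ^ k).toNat ∧
    (v % 2 ^ (k + 1)).toNat % 2 = (v % 2).toNat := by
  have hP : (0:Int) < 2 ^ k := by positivity
  have hP1 : (0:Int) < 2 ^ (k+1) := by positivity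
  have hps : (2:Int) ^ (k+1) = 2 ^ k * 2 := by ring
  have hr0 : (0:Int) ≤ v % 2 ^ (k+1) := Int.emod_nonneg _ (by omega)
  have hr1 : v % 2 ^ (k+1) < 2 ^ (k+1) := Int.emod_lt_of_pos _ hP1
  have hdef : v % 2 ^ (k+1) = v - 2 ^ (k+1) * (v / 2 ^ (k+1)) := Int.emod_def v _
  set q := v / 2 ^ (k+1) with hqdef
  have hq : v / 2 = (v % 2 ^ (k+1)) / 2 + 2 ^ k * q := by
    have h1 : v % 2 ^ (k+1) = v + (-(2 ^ k * q)) * 2 := by rw [hdef]; ring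
    have h2 := congrArg (fun x => x / 2) h1
    simp only at h2
    rw [h2, Int.add_mul_ediv_right _ _ (by omega : (2:Int) ≠ 0)]
    ring
  constructor
  · have hmod : (v / 2) % 2 ^ k = (v % 2 ^ (k+1)) / 2 := by
      rw [hq, Int.add_mul_emod_self_left]
      exact Int.emod_eq_of_lt (by omega) (by omega)
    rw [hmod]
    omega
  · have hmod2 : (v % 2 ^ (k+1)) % 2 = v % 2 := by
      rw [hdef, hps]
      have h3 : v - 2 ^ k * 2 * q = v + 2 * (-(2^k * q)) := by ring
      rw [h3, Int.add_mul_emod_self_left]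
    omega

theorem mapBits_eq_bitsN (k : Nat) : ∀ v : Int,
    mapBits k v = (bitsN k (v % 2 ^ k).toNat).map trChar := by
  induction k with
  | zero => intro v; rfl
  | succ k ih =>
    intro v
    rw [mapBits, bitsN, List.map_append]
    obtain ⟨h1, h2⟩ := halve v k
    have hsh : v >>> (1:Nat) = v / 2 := by simpa using Int.shiftRight_eq_div_pow v 1
    rw [hsh, ih (v / 2), h1]
    congr 1
    have hb : v % 2 = 0 ∨ v % 2 = 1 := Int.emod_two_eq_zero_or_one v
    rcases hb with hb | hb <;>
      simp [hb, h2, trChar]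

-- Python's s >> (a+1) = (s >> 1) >> a
theorem shiftRight_succ (v : Int) (a : Nat) :
    v >>> (a + 1) = (v >>> (1:Nat)) >>> a := by
  rw [Int.shiftRight_eq_div_pow, Int.shiftRight_eq_div_pow, Int.shiftRight_eq_div_pow,
      Int.ediv_ediv_of_nonneg (by positivity)]
  congr 1
  push_cast
  ring

theorem chr_band_one (v : Int) :
    ((PySem.Str.pyGet? " #" (PySem.Int.band v 1)).getD ' ')
      = if v % 2 = 1 then '#' else ' ' := by
  have hb : PySem.Int.band v 1 = v % 2 := by
    have := PySem.Int.band_one v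
    rwa [PySem.Int.mod_eq_emod_of_pos (by omega)] at this
  have h2 : v % 2 = 0 ∨ v % 2 = 1 := Int.emod_two_eq_zero_or_one v
  rcases h2 with h2 | h2 <;> simp [hb, h2]

theorem range_chars (m : Nat) : ∀ v : Int,
    (List.range (m + 1)).map (fun (k : Nat) =>
      ((PySem.Str.pyGet? " #"
        (PySem.Int.band (v >>> ((m : Int) - (k : Int)).toNat) 1)).getD ' '))
    = mapBits (m + 1) v := by
  induction m with
  | zero =>
    intro v
    have h0 : v >>> (0:Nat) = v := by simpa using Int.shiftRight_eq_div_pow v 0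
    rw [mapBits, mapBits, List.range_one]
    simp only [List.map_cons, List.map_nil]
    rw [show (((0:Nat) : Int) - ((0:Nat) : Int)).toNat = 0 by omega, h0, chr_band_one v]
    rfl
  | succ m ih =>
    intro v
    rw [List.range_succ, List.map_append, mapBits, ← ih (v >>> (1:Nat))]
    congr 1
    · apply List.map_congr_left
      intro k hk
      rw [List.mem_range] at hk
      have ht1 : (((m + 1 : Nat) : Int) - k).toNat = (m - k) + 1 := by omega
      have ht2 : (((m : Nat) : Int) - k).toNat = m - k := by omega
      rw [ht1, ht2, shiftRight_succ]
    · simp only [List.map_cons, List.map_nil]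
      have ht : (((m + 1 : Nat) : Int) - ((m + 1 : Nat) : Nat)).toNat = 0 := by omega
      have h0 : v >>> (0:Nat) = v := by simpa using Int.shiftRight_eq_div_pow v 0
      rw [ht, h0, chr_band_one v]

theorem foldl_push_toList (f : Int → Char) : ∀ (xs : List Int) (s0 : String),
    (xs.foldl (fun s i => s.push (f i)) s0).toList = s0.toList ++ xs.map f := by
  intro xs
  induction xs with
  | nil => intro s0; simp
  | cons x xs ih => intro s0; simp [ih]

theorem rowA_eq_mapBits (m : Nat) (v : Int) :
    (PySem.List.pyRange (m : Int) (-1) (-1)).foldl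
      (fun (s : String) (idx : Int) => s.push ((PySem.Str.pyGet? " #"
        (PySem.Int.band (v >>> idx.toNat) 1)).getD ' ')) ""
    = String.ofList (mapBits (m + 1) v) := by
  have h := foldl_push_toList
    (fun idx => ((PySem.Str.pyGet? " #" (PySem.Int.band (v >>> idx.toNat) 1)).getD ' '))
    (PySem.List.pyRange (m : Int) (-1) (-1)) ""
  have hlist : ((PySem.List.pyRange (m : Int) (-1) (-1)).foldl
      (fun (s : String) (idx : Int) => s.push ((PySem.Str.pyGet? " #"
        (PySem.Int.band (v >>> idx.toNat) 1)).getD ' ')) "").toList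
      = mapBits (m + 1) v := by
    rw [h]
    rw [PySem.List.pyRange_neg_one]
    have hm : ((m : Int) - (-1)).toNat = m + 1 := by omega
    rw [hm, List.map_map, ← range_chars m v]
    simp
  have := congrArg String.ofList hlist
  simpa using this

theorem row_eq (n : Int) (v : Int) :
    (PySem.List.pyRange (n - 1) (-1) (-1)).foldl
      (fun (s : String) (idx : Int) => s.push ((PySem.Str.pyGet? " #"
        (PySem.Int.band (v >>> idx.toNat) 1)).getD ' ')) ""
    = if n ≤ 0 then ""
      else String.ofList ((fmtPad n.toNat
        (PySem.Int.band v (((1 : Int) <<< n.toNat) - 1))).map trChar) := by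
  by_cases hn : n ≤ 0
  · rw [if_pos hn, PySem.List.pyRange_neg_one_eq_nil (by omega)]
    rfl
  · rw [if_neg hn]
    have hm : n - 1 = ((n.toNat - 1 : Nat) : Int) := by omega
    have hmt : (n.toNat - 1) + 1 = n.toNat := by omega
    rw [hm, rowA_eq_mapBits (n.toNat - 1) v, hmt]
    congr 1
    have hmask : ((1 : Int) <<< n.toNat - 1 : Int) = 2 ^ n.toNat - 1 := by
      rw [Int.shiftLeft_eq]; ring
    rw [hmask, band_two_pow_sub_one, mapBits_eq_bitsN]
    congr 1
    have hP : (0:Int) < 2 ^ n.toNat := by positivity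
    have hr0 : (0:Int) ≤ v % 2 ^ n.toNat := Int.emod_nonneg _ (by omega)
    have hr1 : v % 2 ^ n.toNat < 2 ^ n.toNat := Int.emod_lt_of_pos _ hP
    have hcast : ((2 ^ n.toNat : Nat) : Int) = 2 ^ n.toNat := by push_cast; ring
    have hwlt : (v % 2 ^ n.toNat).toNat < 2 ^ n.toNat := by omega
    rw [fmtPad, PySem.Int.toBinChars, if_neg (by omega), toDigits_two_eq]
    exact (padBin n.toNat _ (by omega) hwlt).symm

theorem replace_zero_zero (s : String) : PySem.Str.replace "0" "0" s = s := by
  have h : (PySem.Str.replace "0" "0" s).toList = s.toList := by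
    rw [PySem.Str.toList_replace]
    have h0 : ("0" : String).toList = ['0'] := by decide
    rw [h0]
    simp [PySem.Chars.replace, PySem.Chars.replace.go, List.isPrefixOf]
  have := congrArg String.ofList h
  simpa using this

theorem loopA_eq_map (row : Int → String) (lst : List Int) :
    ∀ (d j : Nat) (acc : List String), lst.length - j = d → acc.length = lst.length → j ≤ lst.length →
      (∀ i, j ≤ i → i < lst.length → acc[i]? = some "0") →
      ((PySem.List.pyRange (j : Int) lst.length 1).foldl (fun ans i =>
          PySem.List.pySetD ans i
            (PySem.Str.replace (PySem.List.pyGetD ans i "") "0" (row (PySem.List.pyGetD lst i 0)))) acc)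
      = acc.take j ++ (lst.drop j).map row := by
  intro d
  induction d with
  | zero =>
    intro j acc hd hlen hj hinv
    have hj' : j = lst.length := by omega
    rw [PySem.List.pyRange_one_eq_nil (by omega), List.foldl_nil,
        List.take_of_length_le (by omega), List.drop_of_length_le (by omega)]
    simp
  | succ d ih =>
    intro j acc hd hlen hj hinv
    have hjlt : j < lst.length := by omega
    rw [PySem.List.pyRange_one_cons (by exact_mod_cast hjlt)]
    rw [List.foldl_cons]
    have hjget : acc[j]? = some "0" := hinv j (le_refl j) hjlt
    have hstepj : PySem.List.pySetD acc (j : Int)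
          (PySem.Str.replace (PySem.List.pyGetD acc (j : Int) "") "0"
            (row (PySem.List.pyGetD lst (j : Int) 0)))
        = acc.set j (row (lst.getD j 0)) := by
      simp only [PySem.List.pySetD_natCast, PySem.List.pyGetD_natCast]
      have hgd : acc.getD j "" = "0" := by
        simp [List.getD_eq_getElem?_getD, hjget]
      rw [hgd, replace_zero_zero]
    have hcast : ((j : Int) + 1) = ((j + 1 : Nat) : Int) := by push_cast; ring
    rw [hstepj, hcast, ih (j + 1) (acc.set j (row (lst.getD j 0))) (by omega) (by simpa using hlen)
        (by omega)
        (fun i hi1 hi2 => by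
          rw [List.getElem?_set_ne (by omega)]
          exact hinv i (by omega) hi2)]
    have hdrop : lst.drop j = lst[j] :: lst.drop (j + 1) := List.drop_eq_getElem_cons hjlt
    rw [hdrop]
    have htake : (acc.set j (row (lst.getD j 0))).take (j + 1)
        = acc.take j ++ [row (lst.getD j 0)] := by
      have hts : (acc.set j (row (lst.getD j 0))).take j = acc.take j := by
        apply List.ext_getElem
        · simp
        · intro i h1 h2
          simp only [List.getElem_take]
          rw [List.getElem_set_ne (by simp at h1; omega)]
      rw [List.take_succ, hts]
      simp [List.getElem?_set, show j < acc.length by omega]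
    rw [htake]
    have hget : lst.getD j 0 = lst[j] := List.getD_eq_getElem _ _ hjlt
    rw [hget, List.map_cons, List.append_assoc, List.singleton_append]


theorem lst_eq_zip (arr1 arr2 : List Int) (h : arr1.length ≤ arr2.length) :
    (PySem.List.pyRange 0 arr1.length 1).map
      (fun i => PySem.Int.bor (PySem.List.pyGetD arr1 i 0) (PySem.List.pyGetD arr2 i 0))
    = (arr1.zip arr2).map (fun p => PySem.Int.bor p.1 p.2) := by
  apply List.ext_getElem
  · simp [PySem.List.length_pyRange_one]
    omega
  · intro i h1 h2
    have hi1 : i < arr1.length := by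
      simp [PySem.List.length_pyRange_one] at h1
      omega
    have hi2 : i < arr2.length := by omega
    simp only [List.getElem_map, PySem.List.getElem_pyRange_one, List.getElem_zip]
    rw [zero_add, PySem.List.pyGetD_natCast, PySem.List.pyGetD_natCast,
        List.getD_eq_getElem _ _ hi1, List.getD_eq_getElem _ _ hi2]

-- ===== VERDICT (by name: the statement is the Claim_ definition above) =====

set_option maxHeartbeats 2000000 in
theorem solution11_spec : Claim_equal_solution11 := by
  intro n arr1 arr2 _hdom hpre
  have hp : arr1.length ≤ arr2.length := hpre
  unfold Spec_solution11 solution11 solution11_alt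
  simp only
  rw [lst_eq_zip arr1 arr2 hpre]
  set L : List Int := (arr1.zip arr2).map (fun p => PySem.Int.bor p.1 p.2) with hL
  have hLlen : L.length = arr1.length := by
    simp [hL, List.length_zip]
    omega
  have hloop := loopA_eq_map
    (fun v => (PySem.List.pyRange (n - 1) (-1) (-1)).foldl
      (fun (s : String) (idx : Int) => s.push ((PySem.Str.pyGet? " #"
        (PySem.Int.band (v >>> idx.toNat) 1)).getD ' ')) "")
    L
    L.length 0 (List.replicate arr1.length "0") (by omega) (by rw [List.length_replicate, hLlen]) (by omega)
    (fun i _ hi => by simp [hLlen ▸ hi])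
  simp only [Nat.cast_zero] at hloop
  rw [hloop]
  simp only [List.take_zero, List.drop_zero, List.nil_append]
  by_cases hn : n ≤ 0
  · rw [if_pos hn]
    have hcongr : ∀ v ∈ L, ((PySem.List.pyRange (n - 1) (-1) (-1)).foldl
        (fun (s : String) (idx : Int) => s.push ((PySem.Str.pyGet? " #"
          (PySem.Int.band (v >>> idx.toNat) 1)).getD ' ')) "") = "" := by
      intro v _
      rw [row_eq n v, if_pos hn]
    rw [List.map_congr_left hcongr]
    have h1 : L.map (fun _ => ("" : String)) = List.replicate L.length "" := List.map_const'
    have h2 : arr1.map (fun _ => ("" : String)) = List.replicate arr1.length "" := List.map_const'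
    rw [h1, h2, hLlen]
  · rw [if_neg hn, hL, List.map_map]
    apply List.map_congr_left
    intro p _
    simp only [Function.comp_apply]
    rw [row_eq n _, if_neg hn]
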